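-- pv_equiv track=rewrite | github.com/Oshalb/HackerRank | shiptoys.py | count_weight
-- ===== SOURCE A (Python) =====
-- def count_weight(w):
--     w.sort()
--     r = 1
--     f = w[0]
--     for i in w:
--         c = list(range(f, f+5))
--         if i not in c:
--             f = i
--             r += 1
--     return r
-- ===== SOURCE B (Python) =====
-- from bisect import bisect_right
--
--
-- def count_weight(w):
--     w.sort()
--     r = 1
--     f = w[0]
--     i = bisect_right(w, f + 4)
--     while i < len(w):
--         f = w[i]
--         r += 1
--         i = bisect_right(w, f + 4)
--     return r
-- ===== Notes on version B (the rewrite author's own statement) =====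
-- stated objective: alternative
-- what changed: After sorting, B jumps from one group boundary to the next with bisect_right(w, f+4) instead of scanning every element and testing membership in a freshly built 5-element range list; same overall cost since the sort dominates.
import Mathlib
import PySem

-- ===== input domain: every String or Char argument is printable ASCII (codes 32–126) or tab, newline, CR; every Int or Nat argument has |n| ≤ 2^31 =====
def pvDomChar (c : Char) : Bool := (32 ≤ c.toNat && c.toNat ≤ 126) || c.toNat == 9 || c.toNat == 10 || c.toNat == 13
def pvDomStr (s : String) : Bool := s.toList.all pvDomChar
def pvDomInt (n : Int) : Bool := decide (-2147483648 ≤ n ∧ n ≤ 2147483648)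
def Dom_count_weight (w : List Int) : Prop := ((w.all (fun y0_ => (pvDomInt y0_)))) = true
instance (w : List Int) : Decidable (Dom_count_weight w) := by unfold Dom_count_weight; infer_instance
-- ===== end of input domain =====

-- B replaces A's per-element scan (with a materialised 5-element range list) by
-- bisect_right jumps from one group boundary to the next after the sort (same
-- overall cost: the sort dominates); the equivalence is about the RETURN value
-- (both sort the argument in place).

-- ===== PORT A =====
def count_weight (w : List Int) : Int :=
  let ws := PySem.List.sorted w (fun x => x)
  match PySem.List.pyGet? ws 0 with
  | none => 0   -- unreachable under Pre_ (the empty list raises IndexError in Python)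
  | some f0 =>
    (ws.foldl (fun (st : Int × Int) i =>
      let c := PySem.List.pyRange st.2 (st.2 + 5) 1
      if i ∈ c then st else (st.1 + 1, i)) ((1 : Int), f0)).1

-- ===== PORT B =====
-- the while loop of Source B; the Pairwise hypothesis is used only for termination
def pvAltLoop (ws : List Int) (hs : ws.Pairwise (· ≤ ·)) (i : Nat) (r : Int) : Int :=
  if h : i < ws.length then
    pvAltLoop ws hs (PySem.List.bisectRight ws (ws[i] + 4)) (r + 1)
  else r
termination_by ws.length - i
decreasing_by
  have hspec := PySem.List.bisectRight_spec ws (ws[i] + 4) hs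
  have hlt : i < PySem.List.bisectRight ws (ws[i] + 4) := by
    by_contra hle
    push_neg at hle
    have := hspec.2.2 i h hle
    omega
  omega

def count_weight_alt (w : List Int) : Int :=
  let ws := PySem.List.sorted w (fun x => x)
  match PySem.List.pyGet? ws 0 with
  | none => 0   -- unreachable under Pre_ (the empty list raises IndexError in Python)
  | some f =>
    pvAltLoop ws (PySem.List.sorted_pairwise w (fun x => x))
      (PySem.List.bisectRight ws (f + 4)) 1

-- ===== PRECONDITION & SPEC =====
-- Pre_ excludes only the empty list, on which both Pythons raise IndexError at the first-element access.
def Pre_count_weight (w : List Int) : Prop := w ≠ []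
instance (w : List Int) : Decidable (Pre_count_weight w) := by unfold Pre_count_weight; infer_instance
def pvWitness_count_weight : List Int := [3, 1, 9]

def Spec_count_weight (w : List Int) (out : Int) : Prop := out = count_weight_alt w
instance (w : List Int) (out : Int) : Decidable (Spec_count_weight w out) := by unfold Spec_count_weight; infer_instance

-- ===== CLAIM (what is proved, stated in full; the proofs are below) =====
def Claim_equal_count_weight : Prop := ∀ (w : List Int), Dom_count_weight w → Pre_count_weight w → Spec_count_weight w (count_weight w)

-- ===== LEMMAS AND PROOFS =====

-- number of extra groups after a group opened at f, for a sorted list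
def pvGroups (f : Int) (xs : List Int) : Int :=
  match h : xs.dropWhile (fun a => decide (a ≤ f + 4)) with
  | [] => 0
  | y :: ys => 1 + pvGroups y ys
termination_by xs.length
decreasing_by
  have hle := List.length_dropWhile_le (fun a => decide (a ≤ f + 4)) xs
  rw [h] at hle
  simp at hle
  omega

theorem pvGroups_indep (f : Int) (xs ys : List Int)
    (h : xs.dropWhile (fun a => decide (a ≤ f + 4)) = ys.dropWhile (fun a => decide (a ≤ f + 4))) :
    pvGroups f xs = pvGroups f ys := by
  rw [pvGroups, pvGroups, h]

theorem pv_getElem_of_split (l l1 : List Int) (y : Int) (ys : List Int)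
    (h : l = l1 ++ y :: ys) (hlt : l1.length < l.length) : l[l1.length]'hlt = y := by
  subst h
  rw [List.getElem_append_right (Nat.le_refl _)]
  simp

theorem pv_dropWhile_head_false {p : Int → Bool} {l : List Int} {y : Int} {ys : List Int}
    (h : l.dropWhile p = y :: ys) : p y = false := by
  induction l with
  | nil => simp at h
  | cons a t ih =>
    rw [List.dropWhile_cons] at h
    by_cases hpa : p a
    · rw [if_pos hpa] at h; exact ih h
    · rw [if_neg hpa] at h
      cases h
      simpa using hpa

-- A's fold keeps its state over elements inside the current group
theorem pvFoldA_const (xs : List Int) (r f : Int)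
    (hin : ∀ i ∈ xs, f ≤ i ∧ i ≤ f + 4) :
    xs.foldl (fun (st : Int × Int) i =>
      let c := PySem.List.pyRange st.2 (st.2 + 5) 1
      if i ∈ c then st else (st.1 + 1, i)) (r, f) = (r, f) := by
  induction xs with
  | nil => rfl
  | cons a t ih =>
    have ha := hin a (by simp)
    simp only [List.foldl_cons]
    have hmem : a ∈ PySem.List.pyRange f (f + 5) 1 := by
      rw [PySem.List.mem_pyRange_one]; omega
    simp only [hmem, if_pos]
    exact ih (fun i hi => hin i (by simp [hi]))

theorem pvFoldA (n : Nat) (xs : List Int) (f r : Int)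
    (hn : xs.length ≤ n)
    (hp : xs.Pairwise (· ≤ ·)) (hf : ∀ i ∈ xs, f ≤ i) :
    (xs.foldl (fun (st : Int × Int) i =>
      let c := PySem.List.pyRange st.2 (st.2 + 5) 1
      if i ∈ c then st else (st.1 + 1, i)) (r, f)).1 = r + pvGroups f xs := by
  induction n generalizing xs f r with
  | zero =>
    have : xs = [] := List.eq_nil_of_length_eq_zero (by omega)
    subst this
    rw [pvGroups]; simp
  | succ n ih =>
    cases hdw : xs.dropWhile (fun a => decide (a ≤ f + 4)) with
    | nil =>
      have hall : ∀ i ∈ xs, f ≤ i ∧ i ≤ f + 4 := by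
        intro i hi
        refine ⟨hf i hi, ?_⟩
        have := List.dropWhile_eq_nil_iff.mp hdw
        have := this i hi
        simpa using this
      rw [pvFoldA_const xs r f hall, pvGroups, hdw]
      simp
    | cons y ys =>
      have hsplit : xs = xs.takeWhile (fun a => decide (a ≤ f + 4)) ++ y :: ys := by
        conv_lhs => rw [← List.takeWhile_append_dropWhile (p := fun a => decide (a ≤ f + 4)) (l := xs)]
        rw [hdw]
      have hhead : f + 4 < y := by
        have := pv_dropWhile_head_false hdw
        simpa using this
      -- pairwise facts about the suffix y :: ys
      have hdsub : (y :: ys).Sublist xs := by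
        rw [← hdw]; exact List.dropWhile_sublist _
      have hpd : (y :: ys).Pairwise (· ≤ ·) := hp.sublist hdsub
      have hpys : ys.Pairwise (· ≤ ·) := (List.pairwise_cons.mp hpd).2
      have hfys : ∀ i ∈ ys, y ≤ i := (List.pairwise_cons.mp hpd).1
      -- fold over the takeWhile prefix keeps the state
      have htkconst := pvFoldA_const (xs.takeWhile (fun a => decide (a ≤ f + 4))) r f
        (by
          intro i hi
          have hp4 := List.mem_takeWhile_imp hi
          have himem : i ∈ xs := (List.takeWhile_prefix _).subset hi
          simp only [decide_eq_true_eq] at hp4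
          exact ⟨hf i himem, hp4⟩)
      have hymem : y ∉ PySem.List.pyRange f (f + 5) 1 := by
        rw [PySem.List.mem_pyRange_one]; omega
      have hlen : ys.length ≤ n := by
        have := congrArg List.length hsplit
        simp at this
        omega
      conv_lhs => rw [hsplit]
      rw [List.foldl_append, htkconst]
      simp only [List.foldl_cons, hymem, if_false]
      rw [ih ys y (r + 1) hlen hpys hfys]
      have hg2 : pvGroups f xs = 1 + pvGroups y ys := by rw [pvGroups, hdw]
      rw [hg2]
      ring



-- bisectRight on a sorted list finds the length of the matching takeWhile prefix
theorem pvBisect_eq_takeWhile (ws : List Int) (x : Int) (hp : ws.Pairwise (· ≤ ·)) :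
    PySem.List.bisectRight ws x = (ws.takeWhile (fun a => decide (a ≤ x))).length := by
  obtain ⟨hkn, h1, h2⟩ := PySem.List.bisectRight_spec ws x hp
  set p : Int → Bool := fun a => decide (a ≤ x) with hpdef
  set k := PySem.List.bisectRight ws x with hk
  set t := (ws.takeWhile p).length with ht
  have hlen : t + (ws.dropWhile p).length = ws.length := by
    have := congrArg List.length (List.takeWhile_append_dropWhile (p := p) (l := ws))
    rw [List.length_append] at this
    exact this
  have htn : t ≤ ws.length := by omega
  have htw_mem : ∀ (j : Nat) (hj : j < t), ws[j]'(by omega) ≤ x := by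
    intro j hj
    have hpre := List.takeWhile_prefix (l := ws) p
    have hget := hpre.getElem (i := j) (by omega)
    have hmem : (ws.takeWhile p)[j]'(by omega) ∈ ws.takeWhile p := List.getElem_mem _
    have := List.mem_takeWhile_imp hmem
    rw [hget] at this
    simpa [hpdef] using this
  have htw_not : ∀ (hlt : t < ws.length), ¬ (ws[t]'hlt ≤ x) := by
    intro htlt
    cases hdw : ws.dropWhile p with
    | nil => rw [hdw] at hlen; simp at hlen; omega
    | cons y ys =>
      have hsplit : ws = ws.takeWhile p ++ y :: ys := by
        conv_lhs => rw [← List.takeWhile_append_dropWhile (p := p) (l := ws)]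
        rw [hdw]
      have hidx : ws[t]'htlt = y :=
        pv_getElem_of_split ws (ws.takeWhile p) y ys hsplit (by omega)
      have hhead := pv_dropWhile_head_false hdw
      rw [hidx]
      simpa [hpdef] using hhead
  rcases Nat.lt_trichotomy k t with hlt | heq | hgt
  · exfalso
    have hkn' : k < ws.length := by omega
    have := h2 k hkn' (Nat.le_refl k)
    have := htw_mem k hlt
    omega
  · exact heq
  · exfalso
    have htn' : t < ws.length := by omega
    have := h1 t htn' hgt
    exact htw_not htn' this

theorem pvLoopB (m : Nat) (ws : List Int) (hp : ws.Pairwise (· ≤ ·)) (f r : Int)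
    (hm : (ws.dropWhile (fun a => decide (a ≤ f + 4))).length ≤ m) :
    pvAltLoop ws hp (PySem.List.bisectRight ws (f + 4)) r = r + pvGroups f ws := by
  induction m generalizing f r with
  | zero =>
    have hdw : ws.dropWhile (fun a => decide (a ≤ f + 4)) = [] :=
      List.eq_nil_of_length_eq_zero (by omega)
    have hlen : (ws.takeWhile (fun a => decide (a ≤ f + 4))).length = ws.length := by
      have := congrArg List.length (List.takeWhile_append_dropWhile
        (p := fun a => decide (a ≤ f + 4)) (l := ws))
      rw [hdw] at this
      simpa using this
    rw [pvAltLoop, pvBisect_eq_takeWhile ws (f + 4) hp, hlen]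
    simp only [lt_self_iff_false, dite_false]
    rw [pvGroups, hdw]
    simp
  | succ m ih =>
    cases hdw : ws.dropWhile (fun a => decide (a ≤ f + 4)) with
    | nil =>
      have hlen : (ws.takeWhile (fun a => decide (a ≤ f + 4))).length = ws.length := by
        have := congrArg List.length (List.takeWhile_append_dropWhile
          (p := fun a => decide (a ≤ f + 4)) (l := ws))
        rw [hdw] at this
        simpa using this
      rw [pvAltLoop, pvBisect_eq_takeWhile ws (f + 4) hp, hlen]
      simp only [lt_self_iff_false, dite_false]
      rw [pvGroups, hdw]
      simp
    | cons y ys =>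
      set p : Int → Bool := fun a => decide (a ≤ f + 4) with hpdef
      have hsplit : ws = ws.takeWhile p ++ y :: ys := by
        conv_lhs => rw [← List.takeWhile_append_dropWhile (p := p) (l := ws)]
        rw [hdw]
      have hlen : (ws.takeWhile p).length + (y :: ys).length = ws.length := by
        have := congrArg List.length hsplit
        simp at this
        simp
        omega
      have htlt : (ws.takeWhile p).length < ws.length := by simp at hlen; omega
      have hhead : f + 4 < y := by
        have := pv_dropWhile_head_false hdw
        simpa [hpdef] using this
      have hidx : ws[(ws.takeWhile p).length]'htlt = y :=
        pv_getElem_of_split ws (ws.takeWhile p) y ys hsplit htlt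
      -- dropping past the new threshold ignores everything before y
      have hdw2 : ws.dropWhile (fun a => decide (a ≤ y + 4)) =
          ys.dropWhile (fun a => decide (a ≤ y + 4)) := by
        conv_lhs => rw [hsplit]
        rw [List.dropWhile_append]
        have htw_nil : (ws.takeWhile p).dropWhile (fun a => decide (a ≤ y + 4)) = [] := by
          rw [List.dropWhile_eq_nil_iff]
          intro a ha
          have := List.mem_takeWhile_imp ha
          simp only [hpdef, decide_eq_true_eq] at this
          simp only [decide_eq_true_eq]
          omega
        rw [htw_nil]
        simp only [List.isEmpty_nil, if_true]
        rw [List.dropWhile_cons_of_pos (by simp)]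
      have hm2 : (ws.dropWhile (fun a => decide (a ≤ y + 4))).length ≤ m := by
        rw [hdw2]
        have h1 := List.length_dropWhile_le (fun a => decide (a ≤ y + 4)) ys
        have h2 : (List.dropWhile p ws).length = ys.length + 1 := by rw [hdw]; simp
        omega
      rw [pvAltLoop, pvBisect_eq_takeWhile ws (f + 4) hp]
      rw [dif_pos htlt]
      rw [hidx]
      rw [ih y (r + 1) hm2]
      have hgeq : pvGroups y ws = pvGroups y ys := pvGroups_indep y ws ys hdw2
      have hg2 : pvGroups f ws = 1 + pvGroups y ys := by
        rw [pvGroups, ← hpdef, hdw]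
      rw [hgeq, hg2]
      ring

-- ===== VERDICT (by name: the statement is the Claim_ definition above) =====
theorem count_weight_spec : Claim_equal_count_weight := by
  intro w _ hpre
  have hp : (PySem.List.sorted w (fun x => x)).Pairwise (· ≤ ·) :=
    PySem.List.sorted_pairwise w (fun x => x)
  have hlen0 : (PySem.List.sorted w (fun x => x)).length = w.length :=
    PySem.List.length_sorted w (fun x => x) false
  cases hget : PySem.List.pyGet? (PySem.List.sorted w (fun x => x)) 0 with
  | none =>
    exfalso
    rw [PySem.List.pyGet?_zero, List.getElem?_eq_none_iff] at hget
    exact hpre (List.eq_nil_of_length_eq_zero (by omega))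
  | some f0 =>
    obtain ⟨h0lt, h0eq⟩ := List.getElem?_eq_some_iff.mp
      (by rw [← PySem.List.pyGet?_zero]; exact hget)
    have hf : ∀ i ∈ PySem.List.sorted w (fun x => x), f0 ≤ i := by
      intro i hi
      obtain ⟨j, hj, hje⟩ := List.mem_iff_getElem.mp hi
      rcases Nat.eq_zero_or_pos j with hj0 | hjp
      · subst hj0
        rw [← hje, h0eq]
      · have hle := List.pairwise_iff_getElem.mp hp 0 j h0lt hj hjp
        rw [← hje, ← h0eq]
        exact hle
    unfold Spec_count_weight count_weight count_weight_alt
    simp only [hget]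
    rw [pvFoldA (PySem.List.sorted w (fun x => x)).length _ f0 1 (Nat.le_refl _) hp hf]
    rw [pvLoopB ((PySem.List.sorted w (fun x => x)).dropWhile
      (fun a => decide (a ≤ f0 + 4))).length _ hp f0 1 (Nat.le_refl _)]
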